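-- pv_equiv track=rewrite | github.com/niekp/Goedemorgen | modules/MarkdownTodo.py | FilterDone
-- ===== SOURCE A (Python) =====
-- def FilterDone(text):
--     textOut = ""
--     titleFound = False
--     # Elke regel checken op een open taak, zo ja toevoegen
--     for regel in text.split("\n"):
--         if regel.find("[ ]") >= 0:
--             textOut += regel + "\n"
--         elif regel.find("-") < 0 and not titleFound:
--             # De eerste regel zonder - is de titel
--             textOut = regel + "\n" + textOut
--             titleFound = True
--
--     textOut = textOut.rstrip()
--     return textOut
-- ===== SOURCE B (Python) =====
-- def FilterDone(text):
--     def go(lines):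
--         # recurse back-to-front; returns (kept task lines, first title line or None)
--         if not lines:
--             return ([], None)
--         kept, title = go(lines[1:])
--         head = lines[0]
--         if "[ ]" in head:
--             return ([head] + kept, title)
--         if "-" not in head:
--             return (kept, head)
--         return (kept, title)
--     kept, title = go(text.split("\n"))
--     out = kept if title is None else [title] + kept
--     return "\n".join(out).rstrip()
-- ===== Notes on version B (the rewrite author's own statement) =====
-- stated objective: alternative
-- what changed: A's forward loop mutating a string accumulator with a titleFound flag is replaced by a back-to-front structural recursion over the line list that returns a (kept-tasks, first-title) pair, combined once with a join at the end.
import Mathlib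
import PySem

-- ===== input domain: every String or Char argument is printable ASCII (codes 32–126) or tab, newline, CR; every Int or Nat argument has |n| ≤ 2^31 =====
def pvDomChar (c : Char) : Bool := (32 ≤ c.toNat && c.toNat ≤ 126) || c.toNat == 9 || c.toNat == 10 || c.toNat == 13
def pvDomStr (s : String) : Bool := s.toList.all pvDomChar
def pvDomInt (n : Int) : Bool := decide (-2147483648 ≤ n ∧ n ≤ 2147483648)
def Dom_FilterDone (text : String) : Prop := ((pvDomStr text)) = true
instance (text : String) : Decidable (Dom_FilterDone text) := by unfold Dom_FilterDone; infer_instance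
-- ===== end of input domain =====

-- B replaces A's forward loop (string accumulator + titleFound flag) with a back-to-front
-- structural recursion returning a (kept tasks, first title) pair, joined once at the end
-- (objective: alternative; same cost).

-- ===== PORT A =====
def pvStepA (st : List Char × Bool) (regel : List Char) : List Char × Bool :=
  if 0 ≤ PySem.Chars.find regel ['[', ' ', ']'] then
    (st.1 ++ regel ++ ['\n'], st.2)
  else if PySem.Chars.find regel ['-'] < 0 ∧ st.2 = false then
    (regel ++ '\n' :: st.1, true)
  else st

def FilterDone (text : String) : String :=
  let lines := PySem.Chars.splitOn text.toList ['\n']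
  let st := lines.foldl pvStepA ([], false)
  String.ofList (PySem.Chars.rstrip st.1)

-- ===== PORT B =====
-- back-to-front recursion of Source B's go: (kept task lines, first title line or none)
def pvGoB : List (List Char) → List (List Char) × Option (List Char)
  | [] => ([], none)
  | head :: rest =>
    let st := pvGoB rest
    if PySem.Chars.isIn ['[', ' ', ']'] head then (head :: st.1, st.2)
    else if PySem.Chars.isIn ['-'] head = false then (st.1, some head)
    else st

def FilterDone_alt (text : String) : String :=
  let st := pvGoB (PySem.Chars.splitOn text.toList ['\n'])
  let out := match st.2 with
    | none => st.1
    | some t => t :: st.1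
  String.ofList (PySem.Chars.rstrip (PySem.Chars.join ['\n'] out))

-- ===== PRECONDITION & SPEC =====
def Spec_FilterDone (text : String) (out : String) : Prop := out = FilterDone_alt text
instance (text : String) (out : String) : Decidable (Spec_FilterDone text out) := by unfold Spec_FilterDone; infer_instance

-- ===== CLAIM (what is proved, stated in full; the proofs are below) =====
def Claim_equal_FilterDone : Prop := ∀ (text : String), Dom_FilterDone text → Spec_FilterDone text (FilterDone text)

-- ===== LEMMAS AND PROOFS =====

def pvIsTask (l : List Char) : Bool := decide (0 ≤ PySem.Chars.find l ['[', ' ', ']'])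
def pvIsTitle (l : List Char) : Bool :=
  decide (PySem.Chars.find l ['[', ' ', ']'] < 0) && decide (PySem.Chars.find l ['-'] < 0)

theorem pv_isIn_iff (sub l : List Char) :
    PySem.Chars.isIn sub l = true ↔ 0 ≤ PySem.Chars.find l sub := by
  rw [PySem.Chars.isIn_iff_infix, PySem.Chars.find_nonneg_iff]

-- B's recursion computes exactly (filter task, first title)
theorem pvGoB_eq (lines : List (List Char)) :
    pvGoB lines = (lines.filter pvIsTask, lines.find? pvIsTitle) := by
  induction lines with
  | nil => simp [pvGoB]
  | cons l rest ih =>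
    by_cases ht : 0 ≤ PySem.Chars.find l ['[', ' ', ']']
    · have h1 : PySem.Chars.isIn ['[', ' ', ']'] l = true := (pv_isIn_iff _ _).mpr ht
      have h2 : pvIsTitle l = false := by simp [pvIsTitle]; omega
      simp [pvGoB, h1, ih, pvIsTask, ht, h2]
    · have h1 : PySem.Chars.isIn ['[', ' ', ']'] l = false := by
        rw [← Bool.not_eq_true, pv_isIn_iff]; omega
      by_cases hd : PySem.Chars.find l ['-'] < 0
      · have h3 : PySem.Chars.isIn ['-'] l = false := by
          rw [← Bool.not_eq_true, pv_isIn_iff]; omega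
        have h4 : pvIsTitle l = true := by simp [pvIsTitle]; constructor <;> omega
        simp [pvGoB, h1, h3, ih, pvIsTask, ht, h4]
      · have h3 : PySem.Chars.isIn ['-'] l = true := by rw [pv_isIn_iff]; omega
        have h4 : pvIsTitle l = false := by simp [pvIsTitle]; omega
        simp [pvGoB, h1, h3, ih, pvIsTask, ht, h4]

-- each kept line followed by a newline, concatenated (the shape A's accumulator builds)
def pvNL (xs : List (List Char)) : List Char := (xs.map (· ++ ['\n'])).flatten

theorem pvNL_cons (x : List Char) (xs : List (List Char)) :
    pvNL (x :: xs) = x ++ '\n' :: pvNL xs := by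
  simp [pvNL]

theorem pv_fold_true (lines : List (List Char)) (out : List Char) :
    lines.foldl pvStepA (out, true) = (out ++ pvNL (lines.filter pvIsTask), true) := by
  induction lines generalizing out with
  | nil => simp [pvNL]
  | cons l rest ih =>
    by_cases ht : 0 ≤ PySem.Chars.find l ['[', ' ', ']']
    · simp [pvStepA, ht, pvIsTask, List.foldl_cons, ih, pvNL_cons]
    · simp [pvStepA, ht, pvIsTask, List.foldl_cons, ih]

theorem pv_fold_false (lines : List (List Char)) (out : List Char) :
    lines.foldl pvStepA (out, false) =
      match lines.find? pvIsTitle with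
      | none => (out ++ pvNL (lines.filter pvIsTask), false)
      | some t => (t ++ '\n' :: (out ++ pvNL (lines.filter pvIsTask)), true) := by
  induction lines generalizing out with
  | nil => simp [pvNL]
  | cons l rest ih =>
    by_cases ht : 0 ≤ PySem.Chars.find l ['[', ' ', ']']
    · have htask : pvIsTask l = true := by simp [pvIsTask, ht]
      have htitle : pvIsTitle l = false := by simp [pvIsTitle]; omega
      rw [List.foldl_cons]
      have hstep : pvStepA (out, false) l = (out ++ l ++ ['\n'], false) := by
        simp [pvStepA, ht]
      rw [hstep, ih]
      cases h : rest.find? pvIsTitle <;>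
        simp [htitle, h, htask, pvNL_cons]
    · by_cases hd : PySem.Chars.find l ['-'] < 0
      · have htask : pvIsTask l = false := by simp [pvIsTask, ht]
        have htitle : pvIsTitle l = true := by
          simp [pvIsTitle]; constructor <;> omega
        rw [List.foldl_cons]
        have hstep : pvStepA (out, false) l = (l ++ '\n' :: out, true) := by
          simp [pvStepA, ht, hd]
        rw [hstep, pv_fold_true]
        simp [htitle, htask]
      · have htask : pvIsTask l = false := by simp [pvIsTask, ht]
        have htitle : pvIsTitle l = false := by simp [pvIsTitle]; omega
        rw [List.foldl_cons]
        have hstep : pvStepA (out, false) l = (out, false) := by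
          simp [pvStepA, ht, hd]
        rw [hstep, ih]
        simp [htitle, htask]

theorem pv_rstrip_newline (s : List Char) :
    PySem.Chars.rstrip (s ++ ['\n']) = PySem.Chars.rstrip s := by
  simp [PySem.Chars.rstrip,
    show PySem.Chars.isspace '\n' = true from by decide]

theorem pvNL_eq_join_append (x : List Char) (xs : List (List Char)) :
    pvNL (x :: xs) = PySem.Chars.join ['\n'] (x :: xs) ++ ['\n'] := by
  induction xs generalizing x with
  | nil => simp [pvNL, PySem.Chars.join, List.intercalate]
  | cons y ys ih =>
    rw [pvNL_cons, ih y]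
    simp [PySem.Chars.join, List.intercalate, List.intersperse]

theorem pv_rstrip_NL (xs : List (List Char)) :
    PySem.Chars.rstrip (pvNL xs) = PySem.Chars.rstrip (PySem.Chars.join ['\n'] xs) := by
  cases xs with
  | nil => simp [pvNL, PySem.Chars.join, List.intercalate]
  | cons x ys => rw [pvNL_eq_join_append, pv_rstrip_newline]

-- ===== VERDICT (by name: the statement is the Claim_ definition above) =====
theorem FilterDone_spec : Claim_equal_FilterDone := by
  intro text _
  unfold Spec_FilterDone FilterDone FilterDone_alt
  simp only []
  rw [pv_fold_false, pvGoB_eq]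
  cases h : (PySem.Chars.splitOn text.toList ['\n']).find? pvIsTitle with
  | none => simp [pv_rstrip_NL]
  | some t =>
    simp only [List.nil_append]
    rw [← pvNL_cons, pv_rstrip_NL]
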